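-- pv_equiv track=rewrite | github.com/zhi0219/STOCK | tools/verify_powershell_null_safe_trim_contract.py | _paren_pairs
-- ===== SOURCE A (Python) =====
-- def _paren_pairs(line: str) -> dict[int, int]:
--     stack: list[int] = []
--     pairs: dict[int, int] = {}
--     in_single = False
--     in_double = False
--     for idx, char in enumerate(line):
--         if char == "'" and not in_double:
--             in_single = not in_single
--         elif char == '"' and not in_single:
--             in_double = not in_double
--         if in_single or in_double:
--             continue
--         if char == "(":
--             stack.append(idx)
--         elif char == ")" and stack:
--             pairs[idx] = stack.pop()
--     return pairs
-- ===== SOURCE B (Python) =====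
-- def _paren_pairs(line: str) -> dict[int, int]:
--     # Pass 1: quote state machine; collect the parenthesis characters outside quotes, with indices.
--     tokens: list[tuple[int, str]] = []
--     in_single = False
--     in_double = False
--     for idx, char in enumerate(line):
--         if char == "'":
--             if not in_double:
--                 in_single = not in_single
--         elif char == '"':
--             if not in_single:
--                 in_double = not in_double
--         if not in_single and not in_double and char in "()":
--             tokens.append((idx, char))
--     # Pass 2: pure stack matching over the paren tokens (no quote logic, no other chars).
--     stack: list[int] = []
--     pairs: dict[int, int] = {}
--     for idx, char in tokens:
--         if char == "(":
--             stack.append(idx)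
--         elif stack:
--             pairs[idx] = stack.pop()
--     return pairs
-- ===== Notes on version B (the rewrite author's own statement) =====
-- stated objective: alternative
-- what changed: A fuses quote tracking and matching in one loop over all characters; B first extracts the list of parenthesis tokens outside quotes, then runs a pure stack-matching fold over that token list alone.
import Mathlib
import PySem

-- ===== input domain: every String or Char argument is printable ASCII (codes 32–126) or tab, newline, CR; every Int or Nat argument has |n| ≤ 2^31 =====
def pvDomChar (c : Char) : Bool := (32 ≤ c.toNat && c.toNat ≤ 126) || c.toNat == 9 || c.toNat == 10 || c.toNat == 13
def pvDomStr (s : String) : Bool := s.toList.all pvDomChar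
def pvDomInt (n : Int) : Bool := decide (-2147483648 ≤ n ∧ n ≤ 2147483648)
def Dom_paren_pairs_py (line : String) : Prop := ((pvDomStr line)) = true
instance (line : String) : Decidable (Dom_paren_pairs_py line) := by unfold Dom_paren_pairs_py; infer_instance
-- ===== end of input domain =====

-- B replaces A's fused single loop by a tokenising pass (paren chars outside quotes)
-- followed by a pure stack-matching fold over the token list; alternative decomposition, not faster.
-- The Python dict of pairs is the association list in insertion order.

-- ===== PORT A =====
-- A's single loop: toggle quote state, then (if outside quotes) push '(' index / pop on ')'.
-- Python pushes/pops at the list end; here the stack top is the list head.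
def parenALoop (cs : List Char) (idx : Int) (stack : List Int)
    (pairs : List (Int × Int)) (s d : Bool) : List (Int × Int) :=
  match cs with
  | [] => pairs
  | c :: rest =>
    let sd := if c == '\'' && !d then (!s, d)
              else if c == '"' && !s then (s, !d) else (s, d)
    if sd.1 || sd.2 then parenALoop rest (idx + 1) stack pairs sd.1 sd.2
    else if c == '(' then parenALoop rest (idx + 1) (idx :: stack) pairs sd.1 sd.2
    else if c == ')' then
      match stack with
      | t :: st => parenALoop rest (idx + 1) st (pairs ++ [(idx, t)]) sd.1 sd.2
      | [] => parenALoop rest (idx + 1) stack pairs sd.1 sd.2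
    else parenALoop rest (idx + 1) stack pairs sd.1 sd.2

def paren_pairs_py (line : String) : List (Int × Int) :=
  parenALoop line.toList 0 [] [] false false

-- ===== PORT B =====
-- Pass 1: advance the quote state (nested ifs) and append the char as a token iff it is a paren outside quotes.
def quoteAdv (c : Char) (s d : Bool) : Bool × Bool :=
  if c == '\'' then (if !d then (!s, d) else (s, d))
  else if c == '"' then (if !s then (s, !d) else (s, d))
  else (s, d)

def quoteStep (st : Int × Bool × Bool × List (Int × Char)) (c : Char) :
    Int × Bool × Bool × List (Int × Char) :=
  match st with
  | (idx, s, d, toks) =>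
    let sd := quoteAdv c s d
    (idx + 1, sd.1, sd.2,
      toks ++ (if !sd.1 && !sd.2 && (c == '(' || c == ')') then [(idx, c)] else []))

-- Pass 2: pure stack matching over one paren token (no quote logic, no other chars);
-- a non-'(' token is a ')': pop if possible (matchPop), else leave the state unchanged.
def matchPop : List Int → List (Int × Int) → Int → List Int × List (Int × Int)
  | top :: st, pairs, i => (st, pairs ++ [(i, top)])
  | [], pairs, _ => ([], pairs)

def matchStep : List Int × List (Int × Int) → Int × Char → List Int × List (Int × Int)
  | (stack, pairs), (i, c) =>
    if c == '(' then (i :: stack, pairs)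
    else matchPop stack pairs i

def paren_pairs_py_alt (line : String) : List (Int × Int) :=
  ((line.toList.foldl quoteStep (0, false, false, [])).2.2.2.foldl matchStep ([], [])).2

-- ===== PRECONDITION & SPEC =====
def Spec_paren_pairs_py (line : String) (out : List (Int × Int)) : Prop := out = paren_pairs_py_alt line
instance (line : String) (out : List (Int × Int)) : Decidable (Spec_paren_pairs_py line out) := by unfold Spec_paren_pairs_py; infer_instance

-- ===== CLAIM (what is proved, stated in full; the proofs are below) =====
def Claim_equal_paren_pairs_py : Prop := ∀ (line : String), Dom_paren_pairs_py line → Spec_paren_pairs_py line (paren_pairs_py line)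

-- ===== LEMMAS AND PROOFS =====

-- Proof-side recursive characterisation of pass 1's token list.
def toksR (cs : List Char) (idx : Int) (s d : Bool) : List (Int × Char) :=
  match cs with
  | [] => []
  | c :: rest =>
    let sd := quoteAdv c s d
    (if !sd.1 && !sd.2 && (c == '(' || c == ')') then [(idx, c)] else [])
      ++ toksR rest (idx + 1) sd.1 sd.2

theorem foldl_quoteStep_toks (cs : List Char) (idx : Int) (s d : Bool)
    (toks : List (Int × Char)) :
    (cs.foldl quoteStep (idx, s, d, toks)).2.2.2 = toks ++ toksR cs idx s d := by
  induction cs generalizing idx s d toks with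
  | nil => simp [toksR]
  | cons c rest ih =>
    simp only [List.foldl_cons, quoteStep, toksR]
    rw [ih, List.append_assoc]

theorem foldl_matchStep_acc (ts : List (Int × Char)) (st : List Int)
    (p : List (Int × Int)) :
    (ts.foldl matchStep (st, p)).2 = p ++ (ts.foldl matchStep (st, [])).2 := by
  induction ts generalizing st p with
  | nil => simp
  | cons t rest ih =>
    obtain ⟨i, c⟩ := t
    simp only [List.foldl_cons, matchStep]
    by_cases h : (c == '(') = true
    · simp only [h, if_true]
      exact ih ..
    · simp only [h, Bool.false_eq_true, if_false]
      cases st with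
      | nil =>
        simp only [matchPop]
        exact ih ..
      | cons top st' =>
        simp only [matchPop, List.nil_append]
        rw [ih st' (p ++ [(i, top)]), ih st' [(i, top)], List.append_assoc]

theorem quoteAdv_eq (c : Char) (s d : Bool) :
    quoteAdv c s d
      = (if c == '\'' && !d then (!s, d) else if c == '"' && !s then (s, !d) else (s, d)) := by
  unfold quoteAdv
  by_cases h1 : (c == '\'') = true
  · have : (c == '"') = false := by
      revert h1; simp; rintro rfl; decide
    cases d <;> simp [h1, this]
  · by_cases h2 : (c == '"') = true
    · cases s <;> simp [h1, h2]
    · simp [h1, h2]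

theorem parenALoop_eq (cs : List Char) (idx : Int) (stack : List Int)
    (pairs : List (Int × Int)) (s d : Bool) :
    parenALoop cs idx stack pairs s d
      = pairs ++ ((toksR cs idx s d).foldl matchStep (stack, [])).2 := by
  induction cs generalizing idx stack pairs s d with
  | nil => simp [parenALoop, toksR]
  | cons c rest ih =>
    simp only [parenALoop, toksR, quoteAdv_eq]
    rcases hsd : (if c == '\'' && !d then (!s, d) else if c == '"' && !s then (s, !d) else (s, d))
      with ⟨s', d'⟩
    by_cases hq : (s' || d') = true
    · have hff : (!s' && !d' && (c == '(' || c == ')')) = false := by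
        revert hq; cases s' <;> cases d' <;> simp
      simp [hq, hff, ih]
    · have h0 : s' = false ∧ d' = false := by
        revert hq; cases s' <;> cases d' <;> simp
      obtain ⟨rfl, rfl⟩ := h0
      simp only [Bool.or_self, Bool.false_eq_true, if_false, Bool.not_false, Bool.true_and]
      by_cases hop : (c == '(') = true
      · simp [hop, matchStep, ih]
      · by_cases hcl : (c == ')') = true
        · simp only [hop, hcl, Bool.false_eq_true, Bool.false_or, if_true, if_false,
            List.singleton_append, List.foldl_cons, matchStep, matchPop]
          cases stack with
          | nil => exact ih ..
          | cons t st =>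
            show parenALoop rest (idx + 1) st (pairs ++ [(idx, t)]) false false
                = pairs ++ (List.foldl matchStep (st, [] ++ [(idx, t)])
                    (toksR rest (idx + 1) false false)).2
            rw [ih, List.nil_append,
              foldl_matchStep_acc (toksR rest (idx + 1) false false) st [(idx, t)],
              List.append_assoc]
        · simp [hop, hcl, ih]

-- ===== VERDICT (by name: the statement is the Claim_ definition above) =====
theorem paren_pairs_py_spec : Claim_equal_paren_pairs_py := by
  intro line _
  unfold Spec_paren_pairs_py paren_pairs_py paren_pairs_py_alt
  rw [foldl_quoteStep_toks, List.nil_append, parenALoop_eq, List.nil_append]
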